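-- pv_equiv track=rewrite | github.com/miron-alexandru/Coding-Problems_Python-Solutions | Leetcode Solutions/DailyChallenges/2025/March/merge-two-2d-arrays-by-summing-values.py | mergeArrays
-- ===== SOURCE A (Python) =====
-- from typing import List
--
-- def mergeArrays(nums1: List[List[int]], nums2: List[List[int]]) -> List[List[int]]:
--     i, j = 0, 0
--     result = []
--
--     while i < len(nums1) and j < len(nums2):
--         id1, val1 = nums1[i]
--         id2, val2 = nums2[j]
--
--         if id1 < id2:
--             result.append([id1, val1])
--             i += 1
--         elif id1 > id2:
--             result.append([id2, val2])
--             j += 1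
--         else:
--             result.append([id1, val1 + val2])
--             i += 1
--             j += 1
--
--     while i < len(nums1):
--         result.append(nums1[i])
--         i += 1
--
--     while j < len(nums2):
--         result.append(nums2[j])
--         j += 1
--
--     return result
-- ===== SOURCE B (Python) =====
-- from typing import List
--
-- def mergeArrays(nums1: List[List[int]], nums2: List[List[int]]) -> List[List[int]]:
--     out = []
--     i = 0
--     for id2, val2 in nums2:
--         while i < len(nums1) and nums1[i][0] < id2:
--             out.append(nums1[i])
--             i += 1
--         if i < len(nums1) and nums1[i][0] == id2:
--             out.append([id2, nums1[i][1] + val2])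
--             i += 1
--         else:
--             out.append([id2, val2])
--     out.extend(nums1[i:])
--     return out
-- ===== Notes on version B (the rewrite author's own statement) =====
-- stated objective: alternative
-- what changed: Replaced A's synchronized two-pointer merge (one three-way while over both lists plus two tail loops) by a single for-loop over nums2 that, for each row, flushes the smaller-id rows of nums1 past a cursor and merges an equal-id row, then extends with the nums1 remainder.
-- outside the precondition, e.g. on mergeArrays([], [[1]]): A returns [[1]], B raises ValueError; on mergeArrays([[1, 2], [7]], [[1, 3]]): A returns [[1, 5], [7]], B returns [[1, 5], [7]]
import Mathlib
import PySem

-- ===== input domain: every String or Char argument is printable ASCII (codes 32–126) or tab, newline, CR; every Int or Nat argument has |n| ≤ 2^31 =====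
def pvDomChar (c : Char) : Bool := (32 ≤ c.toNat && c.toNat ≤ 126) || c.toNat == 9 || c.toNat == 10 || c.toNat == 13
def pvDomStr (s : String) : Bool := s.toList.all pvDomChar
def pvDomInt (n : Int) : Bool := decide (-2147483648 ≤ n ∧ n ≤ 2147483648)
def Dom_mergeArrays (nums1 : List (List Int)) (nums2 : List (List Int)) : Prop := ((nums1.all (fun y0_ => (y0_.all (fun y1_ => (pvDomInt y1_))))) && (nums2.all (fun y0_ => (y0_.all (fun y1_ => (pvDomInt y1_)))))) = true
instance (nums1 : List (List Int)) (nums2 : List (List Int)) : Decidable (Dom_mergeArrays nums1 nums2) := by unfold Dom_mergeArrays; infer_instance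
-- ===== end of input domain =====

-- B replaces A's synchronized two-pointer merge (explicit j pointer, three-way branch, two
-- tail loops) by one for-loop over nums2 with a cursor scan of nums1 (objective: alternative).
-- Equivalence is about the RETURN value only (neither program mutates its arguments).

-- 'row[0]' / 'row[1]' (and the value read by 'i, v = row' for a length-2 row)
def pvFst (r : List Int) : Int := (PySem.List.pyGet? r 0).getD 0
def pvSnd (r : List Int) : Int := (PySem.List.pyGet? r 1).getD 0

-- ===== PORT A =====
def mergeArrays (nums1 : List (List Int)) (nums2 : List (List Int)) : List (List Int) :=
  match nums1, nums2 with
  | [], ys => ys                    -- first while loop exits; remaining tail of nums2 appended as is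
  | x :: xs, [] => x :: xs          -- remaining tail of nums1 appended as is
  | x :: xs, y :: ys =>
    let id1 := pvFst x
    let val1 := pvSnd x
    let id2 := pvFst y
    let val2 := pvSnd y
    if id1 < id2 then [id1, val1] :: mergeArrays xs (y :: ys)
    else if id1 > id2 then [id2, val2] :: mergeArrays (x :: xs) ys
    else [id1, val1 + val2] :: mergeArrays xs ys

-- ===== PORT B =====
-- the inner while loop: rows of the remaining part of nums1 whose id is < id2 are flushed
-- (appended as is); returns (flushed rows, remaining suffix of nums1)
def pvScan (rem : List (List Int)) (id2 : Int) : List (List Int) × List (List Int) :=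
  match rem with
  | [] => ([], [])
  | r :: rest =>
    if pvFst r < id2 then
      let p := pvScan rest id2
      (r :: p.1, p.2)
    else ([], r :: rest)

-- one iteration of B's for-loop over nums2; state = (out, remaining suffix of nums1)
def pvStep (st : List (List Int) × List (List Int)) (y : List Int) : List (List Int) × List (List Int) :=
  let p := pvScan st.2 (pvFst y)
  if p.2 ≠ [] ∧ pvFst (p.2.headD []) = pvFst y then     -- i < len(nums1) and nums1[i][0] == id2
    (st.1 ++ p.1 ++ [[pvFst y, pvSnd (p.2.headD []) + pvSnd y]], p.2.tail)
  else
    (st.1 ++ p.1 ++ [[pvFst y, pvSnd y]], p.2)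

def mergeArrays_alt (nums1 : List (List Int)) (nums2 : List (List Int)) : List (List Int) :=
  let st := nums2.foldl pvStep ([], nums1)
  st.1 ++ st.2                      -- out.extend(nums1[i:])

-- ===== PRECONDITION & SPEC =====
-- Pre_ excludes inputs with a row of length ≠ 2 (except in nums1 when nums2 = [], where
-- neither program inspects any row): on those A raises ValueError while unpacking whenever
-- its scan reaches the row, and where such a row sits in a region A's scan never unpacks,
-- A returns it verbatim (B does too on the inputs Pre_ still admits).
def Pre_mergeArrays (nums1 : List (List Int)) (nums2 : List (List Int)) : Prop :=
  (∀ r ∈ nums2, r.length = 2) ∧ (nums2 = [] ∨ ∀ r ∈ nums1, r.length = 2)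
instance (nums1 : List (List Int)) (nums2 : List (List Int)) : Decidable (Pre_mergeArrays nums1 nums2) := by unfold Pre_mergeArrays; infer_instance

def pvWitness_mergeArrays : List (List Int) × List (List Int) :=
  ([[1, 2], [2, 3], [4, 5]], [[2, 4], [3, 1], [4, -2]])

def Spec_mergeArrays (nums1 : List (List Int)) (nums2 : List (List Int)) (out : List (List Int)) : Prop := out = mergeArrays_alt nums1 nums2
instance (nums1 : List (List Int)) (nums2 : List (List Int)) (out : List (List Int)) : Decidable (Spec_mergeArrays nums1 nums2 out) := by unfold Spec_mergeArrays; infer_instance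

-- ===== CLAIM (what is proved, stated in full; the proofs are below) =====
def Claim_equal_mergeArrays : Prop := ∀ (nums1 : List (List Int)) (nums2 : List (List Int)), Dom_mergeArrays nums1 nums2 → Pre_mergeArrays nums1 nums2 → Spec_mergeArrays nums1 nums2 (mergeArrays nums1 nums2)

-- ===== LEMMAS AND PROOFS =====

lemma pvFst_pair (a b : Int) : pvFst [a, b] = a := by
  simp [pvFst, PySem.List.pyGet?, PySem.List.pyIdx?]

lemma pvSnd_pair (a b : Int) : pvSnd [a, b] = b := by
  simp [pvSnd, PySem.List.pyGet?, PySem.List.pyIdx?]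

lemma pvRow_eq (r : List Int) (h : r.length = 2) : r = [pvFst r, pvSnd r] := by
  match r, h with
  | [a, b], _ => simp [pvFst, pvSnd, PySem.List.pyGet?, PySem.List.pyIdx?]

-- unfolding equations for A's recursion
lemma pvA_nil_left (ys : List (List Int)) : mergeArrays [] ys = ys := by
  cases ys <;> rw [mergeArrays]

lemma pvA_nil_right (x : List Int) (xs : List (List Int)) :
    mergeArrays (x :: xs) [] = x :: xs := by rw [mergeArrays]

lemma pvA_cons_lt {x y : List Int} (xs ys : List (List Int)) (h : pvFst x < pvFst y) :
    mergeArrays (x :: xs) (y :: ys) = [pvFst x, pvSnd x] :: mergeArrays xs (y :: ys) := by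
  rw [mergeArrays]; simp [h]

lemma pvA_cons_gt {x y : List Int} (xs ys : List (List Int)) (h : pvFst y < pvFst x) :
    mergeArrays (x :: xs) (y :: ys) = [pvFst y, pvSnd y] :: mergeArrays (x :: xs) ys := by
  have hnl : ¬ pvFst x < pvFst y := by omega
  rw [mergeArrays]; simp [hnl, h]

lemma pvA_cons_eq {x y : List Int} (xs ys : List (List Int)) (h : pvFst x = pvFst y) :
    mergeArrays (x :: xs) (y :: ys) = [pvFst x, pvSnd x + pvSnd y] :: mergeArrays xs ys := by
  rw [mergeArrays]; simp [h]

lemma pvScan_snd_subset (l : List (List Int)) (id2 : Int) :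
    ∀ r ∈ (pvScan l id2).2, r ∈ l := by
  induction l with
  | nil => simp [pvScan]
  | cons x xs ih =>
    rw [pvScan]
    split_ifs with h
    · exact fun r hr => List.mem_cons_of_mem _ (ih r hr)
    · exact fun r hr => hr

lemma pvStep_snd_subset (out l : List (List Int)) (y : List Int) :
    ∀ r ∈ (pvStep (out, l) y).2, r ∈ l := by
  simp only [pvStep]
  split_ifs with h
  · exact fun r hr => pvScan_snd_subset l (pvFst y) r (List.mem_of_mem_tail hr)
  · exact fun r hr => pvScan_snd_subset l (pvFst y) r hr

-- the out accumulator only grows by appending: it can be pulled out of one step …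
lemma pvStep_acc (out rem : List (List Int)) (y : List Int) :
    pvStep (out, rem) y = (out ++ (pvStep ([], rem) y).1, (pvStep ([], rem) y).2) := by
  simp only [pvStep]
  split_ifs <;> simp

-- … and out of the whole fold over nums2
lemma pvFold_acc (l2 : List (List Int)) : ∀ (out rem : List (List Int)),
    l2.foldl pvStep (out, rem) =
      (out ++ (l2.foldl pvStep ([], rem)).1, (l2.foldl pvStep ([], rem)).2) := by
  induction l2 with
  | nil => simp
  | cons y ys ih =>
    intro out rem
    rw [List.foldl_cons, List.foldl_cons, pvStep_acc out rem y,
      ih (out ++ (pvStep ([], rem) y).1) (pvStep ([], rem) y).2,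
      ih (pvStep ([], rem) y).1 (pvStep ([], rem) y).2]
    simp

-- one row of nums2 against A's recursion
lemma pvA_step (y : List Int) (ys : List (List Int)) (hy : y.length = 2) :
    ∀ l1 : List (List Int), (∀ r ∈ l1, r.length = 2) →
    mergeArrays l1 (y :: ys) =
      (pvStep ([], l1) y).1 ++ mergeArrays (pvStep ([], l1) y).2 ys := by
  intro l1
  induction l1 with
  | nil =>
    intro _
    have hstep : pvStep ([], ([] : List (List Int))) y = ([[pvFst y, pvSnd y]], []) := by
      simp [pvStep, pvScan]
    rw [hstep, pvA_nil_left, pvA_nil_left]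
    rw [pvRow_eq y hy]
    simp [pvFst_pair, pvSnd_pair]
  | cons x xs ih =>
    intro h1
    rcases lt_trichotomy (pvFst x) (pvFst y) with hlt | heq | hgt
    · -- A emits [id1, val1]; B's inner while flushes x
      have hx2 : x.length = 2 := h1 x List.mem_cons_self
      have hscan : pvScan (x :: xs) (pvFst y) =
          (x :: (pvScan xs (pvFst y)).1, (pvScan xs (pvFst y)).2) := by
        rw [pvScan]; simp [hlt]
      have hstep : pvStep ([], x :: xs) y =
          (x :: (pvStep ([], xs) y).1, (pvStep ([], xs) y).2) := by
        simp only [pvStep, hscan]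
        split_ifs <;> simp
      rw [hstep, pvA_cons_lt xs ys hlt, ih (fun r hr => h1 r (List.mem_cons_of_mem _ hr)),
        ← pvRow_eq x hx2]
      simp
    · -- equal ids: A emits [id1, val1 + val2]; B's scan stops at x and merges it
      have hscan : pvScan (x :: xs) (pvFst y) = ([], x :: xs) := by
        rw [pvScan, if_neg (show ¬ pvFst x < pvFst y by omega)]
      have hstep : pvStep ([], x :: xs) y = ([[pvFst y, pvSnd x + pvSnd y]], xs) := by
        simp [pvStep, hscan, heq]
      rw [hstep, pvA_cons_eq xs ys heq, heq]
      simp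
    · -- A emits [id2, val2]; B's scan stops at x and emits the fresh row
      have hscan : pvScan (x :: xs) (pvFst y) = ([], x :: xs) := by
        rw [pvScan, if_neg (show ¬ pvFst x < pvFst y by omega)]
      have hstep : pvStep ([], x :: xs) y = ([[pvFst y, pvSnd y]], x :: xs) := by
        have hne : pvFst x ≠ pvFst y := ne_of_gt hgt
        simp [pvStep, hscan, hne]
      rw [hstep, pvA_cons_gt xs ys hgt]
      simp

lemma pvChar (l2 : List (List Int)) : ∀ l1 : List (List Int),
    (∀ r ∈ l1, r.length = 2) → (∀ r ∈ l2, r.length = 2) →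
    mergeArrays l1 l2 = (l2.foldl pvStep ([], l1)).1 ++ (l2.foldl pvStep ([], l1)).2 := by
  induction l2 with
  | nil =>
    intro l1 _ _
    cases l1 <;> simp [pvA_nil_left, pvA_nil_right]
  | cons y ys ih =>
    intro l1 h1 h2
    rw [List.foldl_cons,
      show pvStep ([], l1) y = ((pvStep ([], l1) y).1, (pvStep ([], l1) y).2) from rfl,
      pvFold_acc ys (pvStep ([], l1) y).1 (pvStep ([], l1) y).2]
    rw [pvA_step y ys (h2 y List.mem_cons_self) l1 h1,
      ih (pvStep ([], l1) y).2
        (fun r hr => h1 r (pvStep_snd_subset [] l1 y r hr))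
        (fun r hr => h2 r (List.mem_cons_of_mem _ hr))]
    simp

-- ===== VERDICT (by name: the statement is the Claim_ definition above) =====
theorem mergeArrays_spec : Claim_equal_mergeArrays := by
  intro l1 l2 _ hpre
  unfold Spec_mergeArrays mergeArrays_alt
  rcases hpre.2 with rfl | h1
  · cases l1 <;> simp [pvA_nil_left, pvA_nil_right]
  · exact pvChar l2 l1 h1 hpre.1
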